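-- pv_equiv track=rewrite | github.com/Aho-Wono/ILASmahjong | ryanpeiko.py | ryanpeiko
-- ===== SOURCE A (Python) =====
-- import itertools
--
-- def ryanpeiko(naki, tumo, kawa, menzen_pattern):
--     if not naki:
--         return False
--     if len(menzen_pattern) != 4:
--         return False
--     for permu in itertools.permutations(menzen_pattern, 4):
--         if permu[0] == permu[1] and permu[2] == permu[3]:
--             return True
--     return False
-- ===== SOURCE B (Python) =====
-- from collections import Counter
--
-- def ryanpeiko(naki, tumo, kawa, menzen_pattern):
--     if not naki or len(menzen_pattern) != 4:
--         return False
--     return all(v % 2 == 0 for v in Counter(menzen_pattern).values())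
-- ===== Notes on version B (the rewrite author's own statement) =====
-- stated objective: simpler
-- what changed: Replaces the scan over all 24 permutations of the four tiles with a single frequency count: the hand splits into two pairs iff every tile's multiplicity is even.
import Mathlib
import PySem

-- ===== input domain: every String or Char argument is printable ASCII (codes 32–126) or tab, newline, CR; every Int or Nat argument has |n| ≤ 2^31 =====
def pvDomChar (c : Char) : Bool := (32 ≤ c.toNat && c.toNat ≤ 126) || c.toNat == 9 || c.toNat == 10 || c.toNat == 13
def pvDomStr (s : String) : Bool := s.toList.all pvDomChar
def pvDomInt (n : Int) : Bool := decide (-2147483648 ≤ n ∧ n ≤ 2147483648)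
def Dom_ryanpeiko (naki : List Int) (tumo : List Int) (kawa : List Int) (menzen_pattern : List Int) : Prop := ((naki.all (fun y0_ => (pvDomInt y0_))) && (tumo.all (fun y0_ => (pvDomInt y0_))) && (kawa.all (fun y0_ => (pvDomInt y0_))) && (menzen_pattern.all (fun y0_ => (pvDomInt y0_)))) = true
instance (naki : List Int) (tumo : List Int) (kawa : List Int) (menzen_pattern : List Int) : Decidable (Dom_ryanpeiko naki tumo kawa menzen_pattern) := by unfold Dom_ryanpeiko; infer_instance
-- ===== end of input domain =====

-- B replaces A's scan over all 24 permutations of the four tiles by a frequency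
-- count (two matching pairs exist iff every tile multiplicity is even): simpler.


-- ===== PORT A =====
-- itertools.permutations, hand-ported: all orderings of the list (insertion scheme)
def pvInsertions (x : Int) : List Int → List (List Int)
  | [] => [[x]]
  | y :: ys => (x :: y :: ys) :: (pvInsertions x ys).map (y :: ·)

def pvPerms : List Int → List (List Int)
  | [] => [[]]
  | x :: xs => (pvPerms xs).flatMap (pvInsertions x)

def ryanpeiko (naki : List Int) (tumo : List Int) (kawa : List Int) (menzen_pattern : List Int) : Bool :=
  if naki = [] then false
  else if menzen_pattern.length ≠ 4 then false
  else (pvPerms menzen_pattern).any (fun permu =>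
    match permu with
    | a :: b :: c :: d :: _ => a == b && c == d
    | _ => false)

-- ===== PORT B =====
def ryanpeiko_alt (naki : List Int) (tumo : List Int) (kawa : List Int) (menzen_pattern : List Int) : Bool :=
  if naki = [] || menzen_pattern.length ≠ 4 then false
  else (PySem.Dict.counter menzen_pattern).values.all (fun v => v % 2 == 0)

-- ===== PRECONDITION & SPEC =====
def Spec_ryanpeiko (naki : List Int) (tumo : List Int) (kawa : List Int) (menzen_pattern : List Int) (out : Bool) : Prop := out = ryanpeiko_alt naki tumo kawa menzen_pattern
instance (naki : List Int) (tumo : List Int) (kawa : List Int) (menzen_pattern : List Int) (out : Bool) : Decidable (Spec_ryanpeiko naki tumo kawa menzen_pattern out) := by unfold Spec_ryanpeiko; infer_instance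

-- ===== CLAIM (what is proved, stated in full; the proofs are below) =====
def Claim_equal_ryanpeiko : Prop := ∀ (naki : List Int) (tumo : List Int) (kawa : List Int) (menzen_pattern : List Int), Dom_ryanpeiko naki tumo kawa menzen_pattern → Spec_ryanpeiko naki tumo kawa menzen_pattern (ryanpeiko naki tumo kawa menzen_pattern)

-- ===== LEMMAS AND PROOFS =====

-- the core identity on a four-tile hand
theorem pvCore (a b c d : Int) :
    (pvPerms [a, b, c, d]).any (fun permu =>
      match permu with
      | a :: b :: c :: d :: _ => a == b && c == d
      | _ => false)
    = (PySem.Dict.counter [a, b, c, d]).values.all (fun v => v % 2 == 0) := by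
  by_cases hab : a = b <;> by_cases hac : a = c <;> by_cases had : a = d <;>
    by_cases hbc : b = c <;> by_cases hbd : b = d <;> by_cases hcd : c = d <;>
    subst_eqs <;>
    simp_all [pvPerms, pvInsertions, PySem.Dict.counter, PySem.Dict.modify,
      PySem.Dict.values, PySem.Dict.empty, PySem.Dict.getD, PySem.Dict.get?,
      PySem.Dict.insert, List.flatMap, beq_iff_eq] <;> omega

-- ===== VERDICT (by name: the statement is the Claim_ definition above) =====
theorem ryanpeiko_spec : Claim_equal_ryanpeiko := by
  intro naki tumo kawa mp _
  unfold Spec_ryanpeiko ryanpeiko ryanpeiko_alt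
  by_cases hn : naki = []
  · simp [hn]
  · by_cases hl : mp.length = 4
    · match mp, hl with
      | [a, b, c, d], _ =>
        simp only [hn, ite_not]
        simp [pvCore a b c d]
    · simp [hn, hl]
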